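-- pv_equiv track=rewrite | github.com/Sarnavskiy-Alexey/MAI_Python | 7_kyu/Simple_Letter_Removal.py | solve
-- ===== SOURCE A (Python) =====
-- def solve(st, k):
--     letter = 'a'
--     counter = st.count(letter)
--     for n_del in range(k if k < len(st) else len(st)):
--         while len(st) > 0 and counter == 0:
--             letter = chr(ord(letter) + 1)
--             counter += st.count(letter)
--         st = st.replace(letter, '', 1)
--         counter -= 1
--     return st
-- ===== SOURCE B (Python) =====
-- def solve(st, k):
--     # Remove the min(k, len(st)) smallest characters >= 'a' (earliest occurrence
--     # first among equal letters) in one counting pass instead of repeated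
--     # str.count / str.replace scans.
--     r = min(k, len(st))
--     if r <= 0:
--         return st
--     counts = {}
--     for ch in st:
--         if ch >= 'a':
--             counts[ch] = counts.get(ch, 0) + 1
--     quota = {}
--     for ch in sorted(counts):
--         if r == 0:
--             break
--         take = min(counts[ch], r)
--         quota[ch] = take
--         r -= take
--     out = []
--     for ch in st:
--         t = quota.get(ch, 0)
--         if t != 0:
--             quota[ch] = t - 1
--         else:
--             out.append(ch)
--     return ''.join(out)
-- ===== Notes on version B (the rewrite author's own statement) =====
-- stated objective: faster
-- what changed: Replaces A's removal-by-removal str.count/str.replace scans driven by a monotone letter cursor with one frequency-counting pass, a greedy per-letter removal quota over the sorted distinct letters, and a single rebuild pass that drops the earliest quota'd occurrences.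
import Mathlib
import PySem

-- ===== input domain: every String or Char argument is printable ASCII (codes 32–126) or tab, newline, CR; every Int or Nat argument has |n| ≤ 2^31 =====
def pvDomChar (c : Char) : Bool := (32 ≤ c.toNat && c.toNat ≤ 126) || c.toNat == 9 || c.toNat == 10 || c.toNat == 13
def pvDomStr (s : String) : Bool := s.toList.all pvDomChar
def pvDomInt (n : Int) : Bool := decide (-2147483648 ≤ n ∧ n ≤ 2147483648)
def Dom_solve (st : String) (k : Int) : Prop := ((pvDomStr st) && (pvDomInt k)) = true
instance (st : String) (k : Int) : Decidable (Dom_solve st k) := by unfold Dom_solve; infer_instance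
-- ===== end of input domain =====

-- B replaces A's per-removal count/replace string scans with one counting pass, a greedy
-- per-letter removal quota over the sorted distinct letters, and a single rebuild pass (objective: faster).

-- ===== PORT A =====
-- st.count(letter) for the 1-character needle `letter`, held as its code: occurrence count; exact
def pvCountCode (l : List Char) (code : Nat) : Int := (l.countP (fun c => c.toNat == code) : Int)

-- `while len(st) > 0 and counter == 0: letter = chr(ord(letter) + 1); counter += st.count(letter)`
-- The fuel 1114112 - letter only makes the recursion total: Python's chr raises ValueError past
-- 0x10FFFF, so whenever the Python loop terminates normally it makes fewer iterations than this
-- (the inputs on which it would raise are excluded by Pre_solve).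
def pvWhile (l : List Char) : Nat → Nat → Int → Nat × Int
  | 0, letter, counter => (letter, counter)
  | fuel+1, letter, counter =>
    if 0 < l.length ∧ counter = 0 then
      pvWhile l fuel (letter + 1) (counter + pvCountCode l (letter + 1))
    else (letter, counter)

-- st.replace(letter, '', 1) for a 1-character needle: drop the first occurrence; exact
def pvRemoveFirst (code : Nat) : List Char → List Char
  | [] => []
  | c :: cs => if c.toNat = code then cs else c :: pvRemoveFirst code cs

-- `for n_del in range(...)`: the body never reads n_del, so only the iteration count matters
def pvLoop : Nat → List Char → Nat → Int → List Char
  | 0, l, _, _ => l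
  | n+1, l, letter, counter =>
    let p := pvWhile l (1114112 - letter) letter counter
    pvLoop n (pvRemoveFirst p.1 l) p.1 (p.2 - 1)

def solve (st : String) (k : Int) : String :=
  let l := st.toList
  let m : Int := if k < (l.length : Int) then k else (l.length : Int)
  String.ofList (pvLoop m.toNat l 97 (pvCountCode l 97))

-- ===== PORT B =====
-- counts = {}; for ch in st: if ch >= 'a': counts[ch] = counts.get(ch, 0) + 1
def pvCounts (l : List Char) : PySem.Dict Char Int :=
  l.foldl (fun d ch => if 'a' ≤ ch then d.insert ch (d.getD ch 0 + 1) else d) PySem.Dict.empty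

-- quota = {}; for ch in sorted(counts): if r == 0: break; take = min(counts[ch], r); quota[ch] = take; r -= take
def pvQuota (counts : PySem.Dict Char Int) : List Char → Int → PySem.Dict Char Int → PySem.Dict Char Int
  | [], _, q => q
  | ch :: rest, r, q =>
    if r = 0 then q
    else pvQuota counts rest (r - min (counts.getD ch 0) r) (q.insert ch (min (counts.getD ch 0) r))

-- out = []; for ch in st: t = quota.get(ch, 0); if t != 0: quota[ch] = t - 1 else: out.append(ch)
def pvRebuild (q : PySem.Dict Char Int) : List Char → List Char
  | [] => []
  | ch :: rest =>
    if q.getD ch 0 ≠ 0 then pvRebuild (q.insert ch (q.getD ch 0 - 1)) rest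
    else ch :: pvRebuild q rest

def solve_alt (st : String) (k : Int) : String :=
  let l := st.toList
  let r := min k (l.length : Int)
  if r ≤ 0 then st
  else String.ofList
    (pvRebuild (pvQuota (pvCounts l) (PySem.List.sorted (pvCounts l).keys (fun x => x)) r PySem.Dict.empty) l)

-- ===== PRECONDITION & SPEC =====
-- Pre_solve excludes exactly the inputs on which A raises: when min(k, len(st)) removals are
-- demanded but fewer characters ≥ 'a' exist, A's letter cursor runs past chr(0x10FFFF) and
-- raises ValueError (A only ever counts letters upward from 'a').
def Pre_solve (st : String) (k : Int) : Prop :=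
  min k (st.toList.length : Int) ≤ ((st.toList.filter (fun c => decide ('a' ≤ c))).length : Int)
instance (st : String) (k : Int) : Decidable (Pre_solve st k) := by unfold Pre_solve; infer_instance

def pvWitness_solve : String × Int := ("ab", 1)

def Spec_solve (st : String) (k : Int) (out : String) : Prop := out = solve_alt st k
instance (st : String) (k : Int) (out : String) : Decidable (Spec_solve st k out) := by unfold Spec_solve; infer_instance

-- ===== CLAIM (what is proved, stated in full; the proofs are below) =====
def Claim_equal_solve : Prop := ∀ (st : String) (k : Int), Dom_solve st k → Pre_solve st k → Spec_solve st k (solve st k)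
-- ===== LEMMAS AND PROOFS =====

-- Proof-side vocabulary: the removable characters (≥ 'a'), the smallest removable code,
-- one removal step (A and B both remove min(k,len) smallest removable characters, earliest
-- occurrence first), and its iteration.
def pvRem (l : List Char) : List Char := l.filter (fun c => decide ('a' ≤ c))
def pvMin (l : List Char) : Nat := (pvRem l).foldr (fun c m => min c.toNat m) 1114112
def pvStep (l : List Char) : List Char := pvRemoveFirst (pvMin l) l
def pvIter : Nat → List Char → List Char
  | 0, l => l
  | n+1, l => pvIter n (pvStep l)

-- the quota dictionary, read as a function (the value pvQuota gives key c, starting from {})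
def pvQf (C : Char → Int) : List Char → Int → Char → Int
  | [], _, _ => 0
  | ch :: rest, r, c => if r = 0 then 0 else if c = ch then min (C ch) r else pvQf C rest (r - min (C ch) r) c

-- small Char facts
lemma pv_char_toNat_lt (c : Char) : c.toNat < 1114112 := by
  have h : c.val.toNat < 0xd800 ∨ (0xe000 ≤ c.val.toNat ∧ c.val.toNat < 0x110000) := c.valid
  have he : c.toNat = c.val.toNat := rfl
  rcases h with h | ⟨h1, h2⟩ <;> omega
lemma pv_char_toNat_inj {a b : Char} (h : a.toNat = b.toNat) : a = b := by
  apply Char.ext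
  exact UInt32.toNat_inj.mp h
lemma pv_char_le_iff (c : Char) : 'a' ≤ c ↔ 97 ≤ c.toNat := by
  rw [Char.le_def, UInt32.le_iff_toNat_le]; rfl

lemma pv_char_le_iff' (a b : Char) : a ≤ b ↔ a.toNat ≤ b.toNat := by
  rw [Char.le_def, UInt32.le_iff_toNat_le]; exact Iff.rfl

lemma pv_foldr_min_le : ∀ (xs : List Char), ∀ c ∈ xs,
    xs.foldr (fun c m => min c.toNat m) 1114112 ≤ c.toNat := by
  intro xs
  induction xs with
  | nil => intro c hc; cases hc
  | cons a t ih =>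
    intro c hc
    rcases List.mem_cons.mp hc with rfl | hc
    · exact min_le_left _ _
    · exact le_trans (min_le_right _ _) (ih _ hc)

lemma pv_foldr_min_init : ∀ (xs : List Char),
    xs.foldr (fun c m => min c.toNat m) 1114112 ≤ 1114112 := by
  intro xs
  induction xs with
  | nil => simp
  | cons a t ih => exact le_trans (min_le_right _ _) ih

lemma pv_foldr_min_mem : ∀ (xs : List Char), xs ≠ [] →
    ∃ c ∈ xs, c.toNat = xs.foldr (fun c m => min c.toNat m) 1114112 := by
  intro xs
  induction xs with
  | nil => intro h; exact absurd rfl h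
  | cons a t ih =>
    intro _
    by_cases ht : t = []
    · subst ht
      exact ⟨a, List.mem_cons_self, (Nat.min_eq_left (le_of_lt (pv_char_toNat_lt a))).symm⟩
    · obtain ⟨c, hc, hce⟩ := ih ht
      by_cases hle : a.toNat ≤ t.foldr (fun c m => min c.toNat m) 1114112
      · exact ⟨a, List.mem_cons_self, (Nat.min_eq_left hle).symm⟩
      · refine ⟨c, List.mem_cons_of_mem _ hc, ?_⟩
        simpa [Nat.min_eq_right (le_of_not_ge hle)] using hce

-- pvMin facts
lemma pvMin_le {l : List Char} {c : Char} (hc : c ∈ l) (ha : 'a' ≤ c) : pvMin l ≤ c.toNat := by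
  apply pv_foldr_min_le
  exact List.mem_filter.mpr ⟨hc, by simpa using ha⟩
lemma pvMin_attained {l : List Char} (h : pvRem l ≠ []) :
    ∃ c ∈ l, 'a' ≤ c ∧ c.toNat = pvMin l := by
  obtain ⟨c, hc, hce⟩ := pv_foldr_min_mem (pvRem l) h
  obtain ⟨hcl, hp⟩ := List.mem_filter.mp hc
  exact ⟨c, hcl, by simpa using hp, hce⟩

-- pvRemoveFirst facts
lemma length_removeFirst {c : Char} {l : List Char} (h : c ∈ l) :
    (pvRemoveFirst c.toNat l).length + 1 = l.length := by
  induction l with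
  | nil => cases h
  | cons a t ih =>
    simp only [pvRemoveFirst]
    by_cases ha : a.toNat = c.toNat
    · rw [if_pos ha]; rfl
    · rw [if_neg ha]
      have hct : c ∈ t := by
        rcases List.mem_cons.mp h with rfl | hct
        · exact absurd rfl ha
        · exact hct
      simp only [List.length_cons]
      rw [← ih hct]
lemma count_removeFirst_self {c : Char} {l : List Char} (h : c ∈ l) :
    (pvRemoveFirst c.toNat l).count c + 1 = l.count c := by
  induction l with
  | nil => cases h
  | cons a t ih =>
    simp only [pvRemoveFirst]
    by_cases ha : a.toNat = c.toNat
    · rw [if_pos ha, pv_char_toNat_inj ha]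
      simp [List.count_cons]
    · rw [if_neg ha]
      have hct : c ∈ t := by
        rcases List.mem_cons.mp h with rfl | hct
        · exact absurd rfl ha
        · exact hct
      have hac : ¬ (a = c) := fun hh => ha (by rw [hh])
      simp only [List.count_cons]
      rw [← ih hct]
      simp [hac]
lemma count_removeFirst_ne {c x : Char} (l : List Char) (h : x ≠ c) :
    (pvRemoveFirst c.toNat l).count x = l.count x := by
  induction l with
  | nil => rfl
  | cons a t ih =>
    simp only [pvRemoveFirst]
    by_cases ha : a.toNat = c.toNat
    · rw [if_pos ha]
      have : a = c := pv_char_toNat_inj ha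
      subst this
      simp [List.count_cons, Ne.symm h]
    · rw [if_neg ha]
      simp only [List.count_cons, ih]
lemma mem_removeFirst_sub {code : Nat} {l : List Char} {x : Char} (h : x ∈ pvRemoveFirst code l) :
    x ∈ l := by
  induction l with
  | nil => simpa [pvRemoveFirst] using h
  | cons a t ih =>
    simp only [pvRemoveFirst] at h
    by_cases ha : a.toNat = code
    · rw [if_pos ha] at h
      exact List.mem_cons_of_mem _ h
    · rw [if_neg ha] at h
      rcases List.mem_cons.mp h with rfl | h
      · exact List.mem_cons_self
      · exact List.mem_cons_of_mem _ (ih h)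
lemma rem_removeFirst {code : Nat} (h97 : 97 ≤ code) (l : List Char) :
    pvRem (pvRemoveFirst code l) = pvRemoveFirst code (pvRem l) := by
  induction l with
  | nil => rfl
  | cons a t ih =>
    simp only [pvRem] at ih ⊢
    by_cases ha : a.toNat = code
    · have haa : ('a' ≤ a) := (pv_char_le_iff a).mpr (by omega)
      simp [pvRemoveFirst, List.filter_cons, ha, haa]
    · by_cases haa : 'a' ≤ a
      · simp [pvRemoveFirst, List.filter_cons, ha, haa, ih]
      · simp [pvRemoveFirst, List.filter_cons, ha, haa, ih]

lemma countCode_eq_count (l : List Char) (c : Char) :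
    pvCountCode l c.toNat = (l.count c : Int) := by
  unfold pvCountCode
  congr 1
  rw [List.count_eq_countP]
  apply List.countP_congr
  intro x _
  by_cases hx : x = c
  · subst hx; simp
  · simp only [beq_iff_eq, decide_eq_true_eq]
    constructor
    · intro hh; exact absurd (pv_char_toNat_inj (by simpa using hh)) hx
    · intro hh; exact absurd hh hx

-- structural facts about the step
lemma rem_step {l : List Char} (h : pvRem l ≠ []) :
    pvRem (pvStep l) = pvRemoveFirst (pvMin l) (pvRem l) := by
  obtain ⟨c, _, ha, hce⟩ := pvMin_attained h
  have h97 : 97 ≤ pvMin l := by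
    rw [← hce]; exact (pv_char_le_iff c).mp ha
  exact rem_removeFirst h97 l
lemma length_rem_step {l : List Char} (h : pvRem l ≠ []) :
    (pvRem (pvStep l)).length + 1 = (pvRem l).length := by
  obtain ⟨c, hcl, ha, hce⟩ := pvMin_attained h
  rw [rem_step h, ← hce]
  exact length_removeFirst (List.mem_filter.mpr ⟨hcl, by simpa using ha⟩)
lemma pvMin_le_top (l : List Char) : pvMin l ≤ 1114112 := pv_foldr_min_init _
lemma pvMin_le_pvMin_step (l : List Char) : pvMin l ≤ pvMin (pvStep l) := by
  by_cases h : pvRem (pvStep l) = []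
  · have : pvMin (pvStep l) = 1114112 := by unfold pvMin; rw [h]; rfl
    rw [this]; exact pvMin_le_top l
  · obtain ⟨c, hc, ha, hce⟩ := pvMin_attained h
    rw [← hce]
    exact pvMin_le (mem_removeFirst_sub hc) ha

-- ===== A-side =====
lemma pvWhile_spec : ∀ (fuel letter : Nat) (l : List Char),
    pvRem l ≠ [] → 97 ≤ letter → letter ≤ pvMin l → pvMin l - letter < fuel →
    pvWhile l fuel letter (pvCountCode l letter) = (pvMin l, pvCountCode l (pvMin l)) := by
  intro fuel
  induction fuel with
  | zero => intro letter l _ _ _ hfuel; omega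
  | succ fuel ih =>
    intro letter l hne h97 hle hfuel
    have hlne : l ≠ [] := by
      intro hl; subst hl; exact hne rfl
    simp only [pvWhile]
    by_cases hcond : 0 < l.length ∧ pvCountCode l letter = 0
    · rw [if_pos hcond]
      have hz : (l.countP (fun c => c.toNat == letter)) = 0 := by
        have := hcond.2
        unfold pvCountCode at this
        exact_mod_cast this
      have hnm : ∀ x ∈ l, x.toNat ≠ letter := by
        intro x hx
        have := List.countP_eq_zero.mp hz x hx
        simpa using this
      have hlt : letter < pvMin l := by
        rcases lt_or_eq_of_le hle with h | h
        · exact h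
        · obtain ⟨c, hc, _, hce⟩ := pvMin_attained hne
          exact absurd (by omega : c.toNat = letter) (hnm c hc)
      rw [hcond.2, zero_add]
      exact ih (letter + 1) l hne (by omega) hlt (by omega)
    · rw [if_neg hcond]
      have hlen : 0 < l.length := List.length_pos_iff.mpr hlne
      have hc : pvCountCode l letter ≠ 0 := by
        intro hz; exact hcond ⟨hlen, hz⟩
      have hex : ∃ x ∈ l, x.toNat = letter := by
        by_contra hno
        push_neg at hno
        apply hc
        unfold pvCountCode
        have : l.countP (fun c => c.toNat == letter) = 0 :=
          List.countP_eq_zero.mpr (fun x hx => by simpa using hno x hx)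
        exact_mod_cast this
      obtain ⟨x, hx, hxe⟩ := hex
      have hxa : 'a' ≤ x := (pv_char_le_iff x).mpr (by omega)
      have : pvMin l ≤ letter := by
        rw [← hxe]; exact pvMin_le hx hxa
      have heq : pvMin l = letter := by omega
      rw [heq]

lemma pvLoop_spec : ∀ (n : Nat) (l : List Char) (letter : Nat),
    97 ≤ letter → letter ≤ pvMin l → n ≤ (pvRem l).length →
    pvLoop n l letter (pvCountCode l letter) = pvIter n l := by
  intro n
  induction n with
  | zero => intro l letter _ _ _; rfl
  | succ n ih =>
    intro l letter h97 hle hn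
    have hne : pvRem l ≠ [] := by
      intro hz
      rw [hz] at hn
      simp at hn
    obtain ⟨μ, hμl, hμa, hμe⟩ := pvMin_attained hne
    have hμrem : μ ∈ pvRem l := List.mem_filter.mpr ⟨hμl, by simpa using hμa⟩
    have htop : pvMin l < 1114112 := by
      rw [← hμe]; exact pv_char_toNat_lt μ
    simp only [pvLoop]
    rw [pvWhile_spec (1114112 - letter) letter l hne h97 hle (by omega)]
    have hstep : pvRemoveFirst (pvMin l) l = pvStep l := rfl
    have hcnt : pvCountCode l (pvMin l) - 1 = pvCountCode (pvStep l) (pvMin l) := by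
      rw [← hμe, countCode_eq_count, countCode_eq_count]
      have := count_removeFirst_self hμl
      unfold pvStep
      rw [hμe] at this
      omega
    simp only [hstep, hcnt]
    have h97' : 97 ≤ pvMin l := by rw [← hμe]; exact (pv_char_le_iff μ).mp hμa
    have hlen : (pvRem (pvStep l)).length + 1 = (pvRem l).length := length_rem_step hne
    rw [ih (pvStep l) (pvMin l) h97' (pvMin_le_pvMin_step l) (by omega)]
    rfl

-- ===== B-side =====
lemma pvCounts_eq_counter (l : List Char) : pvCounts l = PySem.Dict.counter (pvRem l) := by
  unfold pvCounts pvRem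
  rw [PySem.List.foldl_ite_eq_foldl_filter (p := fun ch : Char => 'a' ≤ ch)
    (f := fun (d : PySem.Dict Char Int) ch => d.insert ch (d.getD ch 0 + 1))]
  exact PySem.Dict.foldl_insert_getD_add_one_eq_counter _

lemma pvQf_zero (C : Char → Int) (ks : List Char) (c : Char) : pvQf C ks 0 c = 0 := by
  cases ks <;> simp [pvQf]
lemma pvQf_of_not_mem (C : Char → Int) : ∀ (ks : List Char) (r : Int) (c : Char), c ∉ ks → pvQf C ks r c = 0 := by
  intro ks
  induction ks with
  | nil => intro r c _; rfl
  | cons ch rest ih =>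
    intro r c hc
    have h1 : c ≠ ch := fun h => hc (h ▸ List.mem_cons_self)
    have h2 : c ∉ rest := fun h => hc (List.mem_cons_of_mem _ h)
    simp only [pvQf]
    by_cases hr : r = 0
    · rw [if_pos hr]
    · rw [if_neg hr, if_neg h1]
      exact ih _ _ h2
lemma pvQf_congr {C C' : Char → Int} : ∀ (ks : List Char) (r : Int) (c : Char),
    (∀ x ∈ ks, C x = C' x) → pvQf C ks r c = pvQf C' ks r c := by
  intro ks
  induction ks with
  | nil => intro r c _; rfl
  | cons ch rest ih =>
    intro r c h
    simp only [pvQf, h ch List.mem_cons_self]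
    split_ifs with hr hch
    · rfl
    · rfl
    · exact ih _ _ (fun x hx => h x (List.mem_cons_of_mem _ hx))

lemma pvQuota_getD (C : PySem.Dict Char Int) :
    ∀ (ks : List Char) (r : Int) (q : PySem.Dict Char Int) (c : Char), ks.Nodup →
    (∀ x ∈ ks, q.getD x 0 = 0) →
    (pvQuota C ks r q).getD c 0 = if c ∈ ks then pvQf (fun x => C.getD x 0) ks r c else q.getD c 0 := by
  intro ks
  induction ks with
  | nil => intro r q c _ _; simp [pvQuota]
  | cons ch rest ih =>
    intro r q c hnd hq
    have hchrest : ch ∉ rest := (List.nodup_cons.mp hnd).1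
    have hndr : rest.Nodup := (List.nodup_cons.mp hnd).2
    simp only [pvQuota]
    by_cases hr : r = 0
    · rw [if_pos hr]
      subst hr
      rw [pvQf_zero]
      by_cases hc : c ∈ ch :: rest
      · rw [if_pos hc, hq c hc]
      · rw [if_neg hc]
    · rw [if_neg hr]
      rw [ih _ (q.insert ch (min (C.getD ch 0) r)) c hndr ?hfresh]
      case hfresh =>
        intro x hx
        rw [PySem.Dict.getD_insert_of_ne _ _ _ (fun h => hchrest (by rw [← h]; exact hx))]
        exact hq x (List.mem_cons_of_mem _ hx)
      by_cases hcch : c = ch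
      · subst hcch
        rw [if_neg hchrest, if_pos List.mem_cons_self]
        rw [PySem.Dict.getD_insert_self]
        simp [pvQf, hr]
      · by_cases hcr : c ∈ rest
        · rw [if_pos hcr, if_pos (List.mem_cons_of_mem _ hcr)]
          simp [pvQf, hr, hcch]
        · rw [if_neg hcr, if_neg (by simp [hcch, hcr])]
          rw [PySem.Dict.getD_insert_of_ne _ _ _ hcch]

lemma pvRebuild_congr : ∀ (l : List Char) (q q' : PySem.Dict Char Int),
    (∀ c, q.getD c 0 = q'.getD c 0) → pvRebuild q l = pvRebuild q' l := by
  intro l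
  induction l with
  | nil => intro q q' _; rfl
  | cons ch rest ih =>
    intro q q' h
    simp only [pvRebuild, h ch]
    by_cases h0 : q'.getD ch 0 ≠ 0
    · rw [if_pos h0, if_pos h0]
      apply ih
      intro c
      by_cases hc : c = ch
      · subst hc; rw [PySem.Dict.getD_insert_self, PySem.Dict.getD_insert_self]
      · rw [PySem.Dict.getD_insert_of_ne _ _ _ hc, PySem.Dict.getD_insert_of_ne _ _ _ hc]
        exact h c
    · rw [if_neg h0, if_neg h0, ih q q' h]

lemma pvRebuild_id {q : PySem.Dict Char Int} (h : ∀ c, q.getD c 0 = 0) :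
    ∀ (l : List Char), pvRebuild q l = l := by
  intro l
  induction l with
  | nil => rfl
  | cons ch rest ih =>
    simp only [pvRebuild, h ch]
    simp [ih]

lemma pvRebuild_peel : ∀ (l : List Char) (q : PySem.Dict Char Int) (c : Char) (t : Int),
    0 ≤ t → q.getD c 0 = t + 1 →
    pvRebuild q l = pvRebuild (q.insert c t) (pvRemoveFirst c.toNat l) := by
  intro l
  induction l with
  | nil => intro q c t _ _; rfl
  | cons x xs ih =>
    intro q c t ht hq
    by_cases hxc : x = c
    · subst hxc
      simp only [pvRemoveFirst, if_pos rfl, pvRebuild, hq]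
      rw [if_pos (by omega : t + 1 ≠ 0)]
      have h1 : t + 1 - 1 = t := by omega
      simp [h1]
    · have hxcn : x.toNat ≠ c.toNat := fun h => hxc (pv_char_toNat_inj h)
      simp only [pvRemoveFirst, if_neg hxcn, pvRebuild]
      rw [PySem.Dict.getD_insert_of_ne _ _ _ hxc]
      by_cases hx0 : q.getD x 0 ≠ 0
      · rw [if_pos hx0, if_pos hx0]
        rw [ih (q.insert x (q.getD x 0 - 1)) c t ht
          (by rw [PySem.Dict.getD_insert_of_ne _ _ _ (fun h => hxc h.symm)]; exact hq)]
        apply pvRebuild_congr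
        intro j
        exact PySem.Dict.getD_insert_insert_comm _ _ _ (fun h => hxc h) j 0
      · rw [if_neg hx0, if_neg hx0]
        rw [ih q c t ht hq]

-- the sorted distinct removable characters
def pvK (l : List Char) : List Char := PySem.List.sorted (PySem.Set.ofList (pvRem l)) (fun x => x)

lemma pvK_nodup (l : List Char) : (pvK l).Nodup :=
  (PySem.List.sorted_perm _ _ _).symm.nodup (PySem.Set.nodup_ofList _)
lemma pvK_pairwise (l : List Char) : (pvK l).Pairwise (· < ·) := by
  have h1 := PySem.List.sorted_pairwise (PySem.Set.ofList (pvRem l)) (fun x => x)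
  have h2 : (pvK l).Pairwise (· ≠ ·) := pvK_nodup l
  exact (h1.and h2).imp (fun h => lt_of_le_of_ne h.1 h.2)
lemma mem_pvK (l : List Char) (c : Char) : c ∈ pvK l ↔ c ∈ pvRem l :=
  (PySem.List.mem_sorted _ _ _ _).trans (PySem.Set.mem_ofList _ _)
lemma pvK_head {l : List Char} {μ : Char} {t : List Char} (hK : pvK l = μ :: t) :
    μ.toNat = pvMin l ∧ μ ∈ pvRem l := by
  have hmem : μ ∈ pvRem l := (mem_pvK l μ).mp (by rw [hK]; exact List.mem_cons_self)
  obtain ⟨hml, hma⟩ := List.mem_filter.mp hmem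
  have hma' : 'a' ≤ μ := by simpa using hma
  refine ⟨le_antisymm ?_ (pvMin_le hml hma'), hmem⟩
  have hrne : pvRem l ≠ [] := by
    intro hz; rw [hz] at hmem; cases hmem
  obtain ⟨c, hc, ha, hce⟩ := pvMin_attained hrne
  have hcK : c ∈ PySem.Set.ofList (pvRem l) :=
    (PySem.Set.mem_ofList _ _).mpr (List.mem_filter.mpr ⟨hc, by simpa using ha⟩)
  have hK' : PySem.List.sorted (PySem.Set.ofList (pvRem l)) (fun x => x) = μ :: t := hK
  have := PySem.List.key_head_sorted_le _ _ hK' c hcK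
  rw [← hce]
  exact (pv_char_le_iff' μ c).mp this

lemma pvK_step_of_count_one {l : List Char} {μ : Char} {t : List Char}
    (hK : pvK l = μ :: t) (hc : (pvRem l).count μ = 1) (hμ : μ.toNat = pvMin l) :
    pvK (pvStep l) = t := by
  have hnd := pvK_nodup l
  rw [hK] at hnd
  have hnotmem : μ ∉ t := (List.nodup_cons.mp hnd).1
  have hndt : t.Nodup := (List.nodup_cons.mp hnd).2
  have hpw := pvK_pairwise l
  rw [hK] at hpw
  have hpwt : t.Pairwise (· < ·) := List.Pairwise.of_cons hpw
  have hμrem : μ ∈ pvRem l := (pvK_head hK).2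
  have hrne : pvRem l ≠ [] := by
    intro hz; rw [hz] at hμrem; cases hμrem
  have hremstep : pvRem (pvStep l) = pvRemoveFirst μ.toNat (pvRem l) := by
    rw [rem_step hrne, hμ]
  apply PySem.List.sorted_eq_of_perm_of_pairwise_lt _ _ _ ?_ hpwt
  rw [List.perm_ext_iff_of_nodup hndt (PySem.Set.nodup_ofList _)]
  intro x
  rw [PySem.Set.mem_ofList, hremstep]
  constructor
  · intro hx
    have hxK : x ∈ pvRem l := (mem_pvK l x).mp (by rw [hK]; exact List.mem_cons_of_mem _ hx)
    have hxμ : x ≠ μ := fun h => hnotmem (h ▸ hx)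
    have h1 : 0 < List.count x (pvRem l) := List.count_pos_iff.mpr hxK
    have h2 := count_removeFirst_ne (pvRem l) hxμ
    exact List.count_pos_iff.mp (by omega)
  · intro hx
    by_cases hxμ : x = μ
    · subst hxμ
      have h1 := count_removeFirst_self hμrem
      have h2 : 0 < List.count x (pvRemoveFirst x.toNat (pvRem l)) := List.count_pos_iff.mpr hx
      omega
    · have hxl : x ∈ pvRem l := mem_removeFirst_sub hx
      have : x ∈ pvK l := (mem_pvK l x).mpr hxl
      rw [hK] at this
      rcases List.mem_cons.mp this with h | h
      · exact absurd h hxμ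
      · exact h
lemma pvK_step_of_count_ge {l : List Char} {μ : Char} {t : List Char}
    (hK : pvK l = μ :: t) (hc : 2 ≤ (pvRem l).count μ) (hμ : μ.toNat = pvMin l) :
    pvK (pvStep l) = μ :: t := by
  have hnd := pvK_nodup l
  rw [hK] at hnd
  have hpw := pvK_pairwise l
  rw [hK] at hpw
  have hμrem : μ ∈ pvRem l := (pvK_head hK).2
  have hrne : pvRem l ≠ [] := by
    intro hz; rw [hz] at hμrem; cases hμrem
  have hremstep : pvRem (pvStep l) = pvRemoveFirst μ.toNat (pvRem l) := by
    rw [rem_step hrne, hμ]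
  apply PySem.List.sorted_eq_of_perm_of_pairwise_lt _ _ _ ?_ hpw
  rw [List.perm_ext_iff_of_nodup hnd (PySem.Set.nodup_ofList _)]
  intro x
  rw [PySem.Set.mem_ofList, hremstep]
  constructor
  · intro hx
    by_cases hxμ : x = μ
    · subst hxμ
      have h1 := count_removeFirst_self hμrem
      exact List.count_pos_iff.mp (by omega)
    · have hxK : x ∈ pvRem l := by
        have : x ∈ pvK l := by rw [hK]; exact hx
        exact (mem_pvK l x).mp this
      have h1 : 0 < List.count x (pvRem l) := List.count_pos_iff.mpr hxK
      have h2 := count_removeFirst_ne (pvRem l) hxμ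
      exact List.count_pos_iff.mp (by omega)
  · intro hx
    have hxl : x ∈ pvRem l := mem_removeFirst_sub hx
    have : x ∈ pvK l := (mem_pvK l x).mpr hxl
    rw [hK] at this
    exact this
-- B's whole computation, as a function of the removal budget
def pvB (l : List Char) (r : Int) : List Char :=
  pvRebuild (pvQuota (PySem.Dict.counter (pvRem l)) (pvK l) r PySem.Dict.empty) l

lemma pvB_getD (l : List Char) (r : Int) (c : Char) :
    (pvQuota (PySem.Dict.counter (pvRem l)) (pvK l) r PySem.Dict.empty).getD c 0
      = pvQf (fun x => ((pvRem l).count x : Int)) (pvK l) r c := by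
  rw [pvQuota_getD _ _ r PySem.Dict.empty c (pvK_nodup l) (fun x _ => rfl)]
  by_cases hc : c ∈ pvK l
  · rw [if_pos hc]
    apply pvQf_congr
    intro x _
    exact PySem.Dict.getD_counter _ _
  · rw [if_neg hc, pvQf_of_not_mem _ _ _ _ hc]
    rfl

lemma pvB_crux {l : List Char} (n : Nat) (h : pvRem l ≠ []) :
    pvB l ((n : Int) + 1) = pvB (pvStep l) (n : Int) := by
  rcases hK : pvK l with _ | ⟨μ, t⟩
  · exfalso
    obtain ⟨c, hc⟩ := List.exists_mem_of_ne_nil _ h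
    have : c ∈ pvK l := (mem_pvK l c).mpr hc
    rw [hK] at this
    cases this
  · obtain ⟨hμ, hμrem⟩ := pvK_head hK
    have hnd := pvK_nodup l
    rw [hK] at hnd
    have hnotmem : μ ∉ t := (List.nodup_cons.mp hnd).1
    have hcm : 0 < List.count μ (pvRem l) := List.count_pos_iff.mpr hμrem
    have hcnt_self : List.count μ (pvRem (pvStep l)) + 1 = List.count μ (pvRem l) := by
      rw [rem_step h, ← hμ]; exact count_removeFirst_self hμrem
    have hcnt_ne : ∀ x : Char, x ≠ μ →
        List.count x (pvRem (pvStep l)) = List.count x (pvRem l) := by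
      intro x hx
      rw [rem_step h, ← hμ]; exact count_removeFirst_ne _ hx
    unfold pvB
    have hQμ : (pvQuota (PySem.Dict.counter (pvRem l)) (pvK l) ((n:Int)+1) PySem.Dict.empty).getD μ 0
        = min ((List.count μ (pvRem l) : Int)) ((n:Int)+1) := by
      rw [pvB_getD, hK]
      simp only [pvQf]
      rw [if_neg (by omega : ¬((n:Int)+1 = 0)), if_true]
    have hpeel := pvRebuild_peel l
      (pvQuota (PySem.Dict.counter (pvRem l)) (pvK l) ((n:Int)+1) PySem.Dict.empty)
      μ (min ((List.count μ (pvRem l) : Int)) ((n:Int)+1) - 1) (by omega) (by rw [hQμ]; omega)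
    have hstep : pvRemoveFirst μ.toNat l = pvStep l := by rw [hμ]; rfl
    rw [hpeel, hstep]
    apply pvRebuild_congr
    intro c
    rw [pvB_getD (pvStep l)]
    by_cases hcμ : c = μ
    · subst hcμ
      rw [PySem.Dict.getD_insert_self]
      by_cases h1 : List.count c (pvRem l) = 1
      · rw [pvK_step_of_count_one hK h1 hμ, pvQf_of_not_mem _ _ _ _ hnotmem]
        omega
      · rw [pvK_step_of_count_ge hK (by omega) hμ]
        simp only [pvQf]
        by_cases hn0 : (n : Int) = 0
        · rw [if_pos hn0]
          omega
        · rw [if_neg hn0, if_true]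
          omega
    · rw [PySem.Dict.getD_insert_of_ne _ _ _ hcμ, pvB_getD, hK]
      simp only [pvQf]
      rw [if_neg (by omega : ¬((n:Int)+1 = 0)), if_neg hcμ]
      by_cases h1 : List.count μ (pvRem l) = 1
      · rw [pvK_step_of_count_one hK h1 hμ]
        have hbud : (n:Int) + 1 - min ((List.count μ (pvRem l) : Int)) ((n:Int)+1) = (n:Int) := by
          omega
        rw [hbud]
        apply pvQf_congr
        intro x hx
        have hxμ : x ≠ μ := fun hh => hnotmem (hh ▸ hx)
        rw [hcnt_ne x hxμ]
      · rw [pvK_step_of_count_ge hK (by omega) hμ]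
        simp only [pvQf]
        by_cases hn0 : (n : Int) = 0
        · rw [if_pos hn0]
          have hbud : (n:Int) + 1 - min ((List.count μ (pvRem l) : Int)) ((n:Int)+1) = 0 := by
            omega
          rw [hbud, pvQf_zero]
        · rw [if_neg hn0, if_neg hcμ]
          have hbud : (n:Int) + 1 - min ((List.count μ (pvRem l) : Int)) ((n:Int)+1)
              = (n:Int) - min ((List.count μ (pvRem (pvStep l)) : Int)) (n:Int) := by
            omega
          rw [hbud]
          apply pvQf_congr
          intro x hx
          have hxμ : x ≠ μ := fun hh => hnotmem (hh ▸ hx)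
          rw [hcnt_ne x hxμ]

lemma pvB_main : ∀ (n : Nat) (l : List Char), n ≤ (pvRem l).length →
    pvB l (n : Int) = pvIter n l := by
  intro n
  induction n with
  | zero =>
    intro l _
    unfold pvB
    apply pvRebuild_id
    intro c
    rw [pvB_getD]
    simp only [Nat.cast_zero]
    exact pvQf_zero _ _ _
  | succ n ih =>
    intro l h
    have hne : pvRem l ≠ [] := by
      intro hz; rw [hz] at h; simp at h
    have hcast : ((n+1 : Nat) : Int) = (n : Int) + 1 := by push_cast; ring
    rw [hcast, pvB_crux n hne, ih (pvStep l) (by have := length_rem_step hne; omega)]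
    rfl

-- ===== VERDICT (by name: the statement is the Claim_ definition above) =====
theorem solve_spec : Claim_equal_solve := by
  intro st k _ hpre
  unfold Spec_solve solve solve_alt
  simp only []
  have hm : (if k < ((st.toList.length : Nat) : Int) then k else ((st.toList.length : Nat) : Int))
      = min k ((st.toList.length : Nat) : Int) := by
    rw [min_def]; split_ifs <;> omega
  rw [hm]
  have hpre' : min k ((st.toList.length : Nat) : Int) ≤ ((pvRem st.toList).length : Int) := hpre
  by_cases hr : min k ((st.toList.length : Nat) : Int) ≤ 0
  · rw [if_pos hr, Int.toNat_of_nonpos hr]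
    exact String.ofList_toList
  · rw [if_neg hr]
    have hnn : 0 ≤ min k ((st.toList.length : Nat) : Int) := by omega
    have hni : (((min k ((st.toList.length : Nat) : Int)).toNat : Nat) : Int)
        = min k ((st.toList.length : Nat) : Int) := Int.toNat_of_nonneg hnn
    have hnle : (min k ((st.toList.length : Nat) : Int)).toNat ≤ (pvRem st.toList).length := by
      omega
    have hne : pvRem st.toList ≠ [] := by
      intro hz
      have h0 : (pvRem st.toList).length = 0 := by rw [hz]; rfl
      omega
    obtain ⟨c, _, ha, hce⟩ := pvMin_attained hne
    have h97 : 97 ≤ pvMin st.toList := by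
      rw [← hce]; exact (pv_char_le_iff c).mp ha
    rw [pvLoop_spec _ st.toList 97 (le_refl _) h97 hnle]
    rw [pvCounts_eq_counter, PySem.Dict.keys_counter]
    have hB := pvB_main (min k ((st.toList.length : Nat) : Int)).toNat st.toList hnle
    rw [hni] at hB
    unfold pvB pvK at hB
    rw [hB]
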